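-- pv_equiv track=rewrite | github.com/ksaittis/codekatas | weird_case.py | to_weird_case_v2
-- ===== SOURCE A (Python) =====
-- def is_even(num) -> bool:
--     return num % 2 == 0
--
-- def to_weird_case_v2(string) -> str:
--     counter = 0
--     weird_case_result = ''
--     for char in string:
--         if char.isspace():
--             counter = 0
--             weird_case_result += ' '
--             continue
--         if is_even(counter):
--             weird_case_result += char.upper()
--             counter += 1
--         else:
--             weird_case_result += char
--             counter += 1
--     return weird_case_result
-- ===== SOURCE B (Python) =====
-- def to_weird_case_v2(string) -> str:
--     pieces = []
--     i = 0
--     n = len(string)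
--     while i < n:
--         if string[i].isspace():
--             j = i
--             while j < n and string[j].isspace():
--                 j += 1
--             pieces.append(' ' * (j - i))
--         else:
--             j = i
--             while j < n and not string[j].isspace():
--                 j += 1
--             pieces.append(''.join(c.upper() if k % 2 == 0 else c
--                                   for k, c in enumerate(string[i:j])))
--         i = j
--     return ''.join(pieces)
-- ===== Notes on version B (the rewrite author's own statement) =====
-- stated objective: alternative
-- what changed: Replaced the per-character reset-counter loop by a segment-first pass: the string is split into maximal whitespace/non-whitespace runs, whitespace runs become an equal number of spaces, and each word is rebuilt by enumerate with even local indices uppercased.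
import Mathlib
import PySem

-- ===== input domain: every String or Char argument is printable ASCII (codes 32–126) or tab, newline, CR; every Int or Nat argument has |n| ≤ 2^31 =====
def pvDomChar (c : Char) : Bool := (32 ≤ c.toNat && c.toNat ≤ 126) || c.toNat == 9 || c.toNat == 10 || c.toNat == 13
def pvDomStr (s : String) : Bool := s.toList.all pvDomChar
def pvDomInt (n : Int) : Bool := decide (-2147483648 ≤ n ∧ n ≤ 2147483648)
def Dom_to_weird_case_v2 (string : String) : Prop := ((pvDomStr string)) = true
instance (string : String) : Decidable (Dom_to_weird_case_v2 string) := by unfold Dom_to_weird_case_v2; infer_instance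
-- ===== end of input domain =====

-- B replaces A's per-character reset-counter loop by a segment-first pass over maximal
-- whitespace/non-whitespace runs (objective: alternative decomposition, same cost).

-- ===== PORT A =====
def is_even (num : Int) : Bool := PySem.Int.mod num 2 == 0

def to_weird_case_v2 (string : String) : String :=
  -- state = (counter, weird_case_result), folded over the characters
  String.mk
    (string.toList.foldl
      (fun (s : Int × List Char) char =>
        if PySem.Chars.isspace char then
          (0, s.2 ++ [' '])
        else if is_even s.1 then
          (s.1 + 1, s.2 ++ [PySem.Chars.upperChar char])
        else
          (s.1 + 1, s.2 ++ [char]))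
      (0, [])).2

-- ===== PORT B =====
-- ''.join(c.upper() if k % 2 == 0 else c for k, c in enumerate(word))
def pvAltWord (word : List Char) : List Char :=
  (PySem.List.enumerate word).map
    (fun p => if PySem.Int.mod p.1 2 == 0 then PySem.Chars.upperChar p.2 else p.2)

-- the two inner while-scans of Source B find the end of the current run: takeWhile/dropWhile
def pvAltGo : List Char → List Char
  | [] => []
  | c :: t =>
    if PySem.Chars.isspace c then
      (' ' :: List.replicate (t.takeWhile PySem.Chars.isspace).length ' ')
        ++ pvAltGo (t.dropWhile PySem.Chars.isspace)
    else
      pvAltWord (c :: t.takeWhile (fun d => !PySem.Chars.isspace d))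
        ++ pvAltGo (t.dropWhile (fun d => !PySem.Chars.isspace d))
termination_by cs => cs.length
decreasing_by
  · have := List.length_dropWhile_le PySem.Chars.isspace t; simp; omega
  · have := List.length_dropWhile_le (fun d => !PySem.Chars.isspace d) t; simp; omega

def to_weird_case_v2_alt (string : String) : String :=
  String.mk (pvAltGo string.toList)

-- ===== PRECONDITION & SPEC =====
def Spec_to_weird_case_v2 (string : String) (out : String) : Prop := out = to_weird_case_v2_alt string
instance (string : String) (out : String) : Decidable (Spec_to_weird_case_v2 string out) := by unfold Spec_to_weird_case_v2; infer_instance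

-- ===== CLAIM (what is proved, stated in full; the proofs are below) =====
def Claim_equal_to_weird_case_v2 : Prop := ∀ (string : String), Dom_to_weird_case_v2 string → Spec_to_weird_case_v2 string (to_weird_case_v2 string)

-- ===== LEMMAS AND PROOFS =====

-- A's loop body, written as a recursion producing only the appended characters
def pvAux (c : Int) : List Char → List Char
  | [] => []
  | ch :: t =>
    if PySem.Chars.isspace ch then ' ' :: pvAux 0 t
    else if is_even c then PySem.Chars.upperChar ch :: pvAux (c + 1) t
    else ch :: pvAux (c + 1) t

-- same, with a Nat counter
def pvG (k : Nat) : List Char → List Char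
  | [] => []
  | ch :: t =>
    if PySem.Chars.isspace ch then ' ' :: pvG 0 t
    else if k % 2 == 0 then PySem.Chars.upperChar ch :: pvG (k + 1) t
    else ch :: pvG (k + 1) t

lemma pvFoldl_eq_aux (cs : List Char) : ∀ (c : Int) (acc : List Char),
    (cs.foldl (fun (s : Int × List Char) char =>
      if PySem.Chars.isspace char then (0, s.2 ++ [' '])
      else if is_even s.1 then (s.1 + 1, s.2 ++ [PySem.Chars.upperChar char])
      else (s.1 + 1, s.2 ++ [char])) (c, acc)).2 = acc ++ pvAux c cs := by
  induction cs with
  | nil => intro c acc; simp [pvAux]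
  | cons ch t ih =>
      intro c acc
      by_cases hs : PySem.Chars.isspace ch
      · simp [List.foldl, hs, pvAux, ih]
      · by_cases he : is_even c
        · simp [List.foldl, hs, pvAux, he, ih]
        · simp [List.foldl, hs, pvAux, he, ih]

lemma pvModCast (k : Nat) : (PySem.Int.mod (k : Int) 2 == 0) = (k % 2 == 0) := by
  rw [PySem.Int.mod_eq_emod_of_pos (by norm_num : (0:Int) < 2)]
  by_cases h : k % 2 = 0
  · simp [h]; omega
  · simp [h]; omega

lemma pvIsEven_natCast (k : Nat) : is_even (k : Int) = (k % 2 == 0) := by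
  rw [is_even, pvModCast]

lemma pvAux_eq_g (cs : List Char) : ∀ (k : Nat), pvAux (k : Int) cs = pvG k cs := by
  induction cs with
  | nil => intro k; simp [pvAux, pvG]
  | cons ch t ih =>
      intro k
      have hc : ((k : Int) + 1) = ((k + 1 : Nat) : Int) := by push_cast; ring
      have h0 := ih 0
      have h1 := ih (k + 1)
      simp only [Nat.cast_zero] at h0
      by_cases hs : PySem.Chars.isspace ch
      · simp only [pvAux, pvG, hs, if_true, h0]
      · by_cases he : k % 2 == 0
        · simp only [pvAux, pvG, hs, Bool.false_eq_true, if_false, pvIsEven_natCast, he, if_true]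
          rw [hc, h1]
        · simp only [pvAux, pvG, hs, Bool.false_eq_true, if_false, pvIsEven_natCast, he]
          rw [hc, h1]

-- the word piece, with an explicit starting index
def pvMapWord (k : Nat) : List Char → List Char
  | [] => []
  | ch :: t =>
    (if k % 2 == 0 then PySem.Chars.upperChar ch else ch) :: pvMapWord (k + 1) t

lemma pvMapWord_eq_enum (xs : List Char) : ∀ (k : Nat),
    pvMapWord k xs = (PySem.List.enumerate xs (k : Int)).map
      (fun p => if PySem.Int.mod p.1 2 == 0 then PySem.Chars.upperChar p.2 else p.2) := by
  induction xs with
  | nil => intro k; simp [pvMapWord, PySem.List.enumerate_nil]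
  | cons ch t ih =>
      intro k
      have hc : ((k : Int) + 1) = ((k + 1 : Nat) : Int) := by push_cast; ring
      simp only [pvMapWord, PySem.List.enumerate_cons, List.map_cons, pvModCast]
      rw [hc, ← ih (k + 1)]

lemma pvMapWord_zero (xs : List Char) : pvMapWord 0 xs = pvAltWord xs := by
  have h := pvMapWord_eq_enum xs 0
  simp only [Nat.cast_zero] at h
  exact h

lemma pvAltGo_cons_space (c : Char) (t : List Char) (h : PySem.Chars.isspace c = true) :
    pvAltGo (c :: t) = (' ' :: List.replicate (t.takeWhile PySem.Chars.isspace).length ' ')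
      ++ pvAltGo (t.dropWhile PySem.Chars.isspace) := by
  rw [pvAltGo.eq_def]; simp [h]

lemma pvAltGo_cons_word (c : Char) (t : List Char) (h : PySem.Chars.isspace c = false) :
    pvAltGo (c :: t) = pvAltWord (c :: t.takeWhile (fun d => !PySem.Chars.isspace d))
      ++ pvAltGo (t.dropWhile (fun d => !PySem.Chars.isspace d)) := by
  rw [pvAltGo.eq_def]; simp [h]

lemma pvG_eq (cs : List Char) : ∀ (k : Nat),
    pvG k cs = pvMapWord k (cs.takeWhile (fun d => !PySem.Chars.isspace d))
      ++ pvAltGo (cs.dropWhile (fun d => !PySem.Chars.isspace d)) := by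
  induction cs with
  | nil => intro k; simp [pvG, pvMapWord, pvAltGo]
  | cons ch t ih =>
      intro k
      by_cases hs : PySem.Chars.isspace ch
      · rw [List.takeWhile_cons, List.dropWhile_cons]
        simp only [hs, Bool.not_true, Bool.false_eq_true, if_false]
        rw [pvAltGo_cons_space ch t hs]
        simp only [pvMapWord, List.nil_append, pvG, hs, if_true]
        cases t with
        | nil => simp [pvG, pvAltGo]
        | cons d t' =>
            by_cases hd : PySem.Chars.isspace d
            · have h0 := ih 0
              rw [List.takeWhile_cons, List.dropWhile_cons] at h0
              simp only [hd, Bool.not_true, Bool.false_eq_true, if_false, pvMapWord,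
                List.nil_append] at h0
              rw [h0, List.takeWhile_cons, List.dropWhile_cons]
              simp only [hd, if_true]
              rw [pvAltGo_cons_space d t' hd]
              simp [List.replicate_succ]
            · have h0 := ih 0
              rw [List.takeWhile_cons, List.dropWhile_cons]
              simp only [hd, Bool.false_eq_true, if_false, List.length_nil,
                List.replicate_zero]
              rw [h0, List.takeWhile_cons, List.dropWhile_cons]
              simp only [hd, Bool.not_false, if_true]
              rw [pvAltGo_cons_word d t' (by simp [hd]), pvMapWord_zero]
              rfl
      · rw [List.takeWhile_cons, List.dropWhile_cons]
        simp only [hs, Bool.not_false, if_true]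
        simp only [pvG, pvMapWord, hs, Bool.false_eq_true, if_false]
        rw [ih (k + 1)]
        by_cases he : k % 2 == 0 <;> simp [he]

lemma pvG_zero_eq_go (cs : List Char) : pvG 0 cs = pvAltGo cs := by
  rw [pvG_eq cs 0]
  cases cs with
  | nil => simp [pvAltGo, pvMapWord]
  | cons ch t =>
      by_cases hs : PySem.Chars.isspace ch
      · rw [List.takeWhile_cons, List.dropWhile_cons]
        simp only [hs, Bool.not_true, Bool.false_eq_true, if_false, pvMapWord, List.nil_append]
      · rw [List.takeWhile_cons, List.dropWhile_cons]
        simp only [hs, Bool.not_false, if_true]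
        rw [pvAltGo_cons_word ch t (by simp [hs]), pvMapWord_zero]

-- ===== VERDICT (by name: the statement is the Claim_ definition above) =====
theorem to_weird_case_v2_spec : Claim_equal_to_weird_case_v2 := by
  intro s _
  show _ = _
  unfold to_weird_case_v2 to_weird_case_v2_alt
  rw [pvFoldl_eq_aux]
  have h : pvAux ((0 : Nat) : Int) s.toList = pvG 0 s.toList := pvAux_eq_g s.toList 0
  simp only [Nat.cast_zero] at h
  rw [List.nil_append, h, pvG_zero_eq_go]
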